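-- pv_equiv track=rewrite | github.com/woose28/TIL | PS/Python/implementation/Programmers_공원_산책.py | solution
-- ===== SOURCE A (Python) =====
-- def solution(park, routes):
--     answer = []
--
--     width = len(park[0])
--     height = len(park)
--
--     mat = [ list(row) for row in park ]
--
--     startPos = []
--
--     for cr, row in enumerate(mat):
--         for cc, pos in enumerate(row):
--             if pos == "S":
--                 startPos.extend([cr, cc]);
--                 mat[cr][cc] = "O"
--
--     for route in routes:
--         [direction, _distance] = route.split(' ')
--         distance = int(_distance)
--
--         [cr, cc] = startPos;
--
--         isMovable = True
--
--         if direction == "S":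
--             for nr in range(cr + 1, cr + distance + 1):
--                 if (nr >= height or mat[nr][cc] == "X"):
--                     isMovable = False
--                     break
--
--             if isMovable:
--                 startPos[0] = cr + distance
--
--         elif direction == "E":
--             for nc in range(cc + 1, cc + distance + 1):
--                 if (nc >= width or mat[cr][nc] == "X"):
--                     isMovable = False
--
--             if isMovable:
--                 startPos[1] = cc + distance
--
--         elif direction == "W":
--             for nc in range(cc - 1, cc - distance -1, -1):
--                 if (nc < 0 or mat[cr][nc] == "X"):
--                     isMovable = False
--
--             if isMovable:
--                 startPos[1] = cc - distance
--
--         elif direction == "N":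
--             for nr in range(cr - 1, cr - distance -1, -1):
--                 if (nr < 0 or mat[nr][cc] == "X"):
--                     isMovable = False
--
--             if isMovable:
--                 startPos[0] = cr - distance
--
--     answer = startPos
--
--     return answer
-- ===== SOURCE B (Python) =====
-- def solution(park, routes):
--     H, W = len(park), len(park[0])
--
--     def prefix_x(cells):
--         acc = [0]
--         for ch in cells:
--             acc.append(acc[-1] + (1 if ch == 'X' else 0))
--         return acc
--
--     # rowx[i][j] = number of 'X' in park[i][:j]
--     rowx = [prefix_x(row) for row in park]
--     # colx[i][j] = number of 'X' in column j of park[:i]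
--     colx = [[0] * W]
--     for row in park:
--         colx.append([p + (1 if ch == 'X' else 0) for p, ch in zip(colx[-1], row)])
--
--     pos = [x for i, row in enumerate(park) for j, ch in enumerate(row)
--            if ch == 'S' for x in (i, j)]
--     delta = {'N': (-1, 0), 'S': (1, 0), 'W': (0, -1), 'E': (0, 1)}
--     for route in routes:
--         d, ns = route.split(' ')
--         n = int(ns)
--         r, c = pos
--         if d in delta:
--             dr, dc = delta[d]
--             nr, nc = r + dr * n, c + dc * n
--             if 0 <= nr < H and 0 <= nc < W:
--                 if dr != 0:
--                     blocked = colx[max(r, nr) + 1][c] - colx[min(r, nr)][c]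
--                 else:
--                     blocked = rowx[r][max(c, nc) + 1] - rowx[r][min(c, nc)]
--                 if blocked == 0:
--                     pos = [nr, nc]
--     return pos
-- ===== Notes on version B (the rewrite author's own statement) =====
-- stated objective: alternative
-- what changed: B precomputes 2D prefix counts of 'X' per row and per column once and decides each route in O(1) by a target-bounds check plus a prefix-sum difference over the traversed segment, instead of A's per-cell walk along each route; the start is listed by one comprehension instead of A's matrix copy with S-to-O rewriting.
-- outside the precondition, e.g. on solution(['S', 'X', ''], ['S 2']): A returns [0, 0], B raises IndexError; on solution(['S', 'O'], ['S -2', 'S 1']): A returns [-1, 0], B returns [1, 0]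
import Mathlib
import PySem

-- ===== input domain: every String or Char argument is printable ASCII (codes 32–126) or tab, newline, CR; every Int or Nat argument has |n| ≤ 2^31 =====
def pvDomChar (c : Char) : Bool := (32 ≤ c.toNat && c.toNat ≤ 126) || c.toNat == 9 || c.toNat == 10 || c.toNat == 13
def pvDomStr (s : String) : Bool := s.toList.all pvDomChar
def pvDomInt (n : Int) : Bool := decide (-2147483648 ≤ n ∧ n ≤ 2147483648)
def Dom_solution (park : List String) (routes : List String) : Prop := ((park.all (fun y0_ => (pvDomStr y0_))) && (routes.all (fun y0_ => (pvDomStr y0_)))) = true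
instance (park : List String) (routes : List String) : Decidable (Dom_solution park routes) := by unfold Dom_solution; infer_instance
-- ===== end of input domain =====

-- B replaces A's per-cell walk along each route by precomputed row/column prefix counts of 'X'
-- (each route decided by a bounds check plus one prefix-sum difference) and lists the start by a
-- comprehension instead of A's matrix copy with S-to-O rewriting (objective: alternative).


-- ===== PORT A =====

-- mat[r][c] as Python reads it (negative indices wrap; none = IndexError)
def cellM (mat : List (List Char)) (r c : Int) : Option Char :=
  (PySem.List.pyGet? mat r).bind (fun row => PySem.List.pyGet? row c)

-- the S-scan loop of A: builds startPos (extend [cr, cc]) and rewrites each 'S' cell to 'O'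
def scanFold (mat0 : List (List Char)) : List Int × List (List Char) :=
  (PySem.List.enumerate mat0).foldl
    (fun (st : List Int × List (List Char)) p =>
      (PySem.List.enumerate p.2).foldl
        (fun (st : List Int × List (List Char)) q =>
          if q.2 = 'S' then
            (st.1 ++ [p.1, q.1], st.2.modify p.1.toNat (fun rw => rw.set q.1.toNat 'O'))
          else st)
        st)
    ([], mat0)

-- the body of A's `for route in routes` loop (startPos kept as the mutated 2-element list)
def aStep (mat : List (List Char)) (height width : Int) (sp : List Int) (route : String) : List Int :=
  match PySem.Str.split? route " " with
  | some [direction, ds] =>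
    match PySem.Int.ofStr? ds with
    | some distance =>
      match sp with
      | [cr, cc] =>
        if direction = "S" then
          let isMovable := (PySem.List.pyRange (cr + 1) (cr + distance + 1) 1).foldl
            (fun b nr => b && !(decide (height ≤ nr) || (cellM mat nr cc == some 'X'))) true
          if isMovable then [cr + distance, cc] else sp
        else if direction = "E" then
          let isMovable := (PySem.List.pyRange (cc + 1) (cc + distance + 1) 1).foldl
            (fun b nc => b && !(decide (width ≤ nc) || (cellM mat cr nc == some 'X'))) true
          if isMovable then [cr, cc + distance] else sp
        else if direction = "W" then
          let isMovable := (PySem.List.pyRange (cc - 1) (cc - distance - 1) (-1)).foldl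
            (fun b nc => b && !(decide (nc < 0) || (cellM mat cr nc == some 'X'))) true
          if isMovable then [cr, cc - distance] else sp
        else if direction = "N" then
          let isMovable := (PySem.List.pyRange (cr - 1) (cr - distance - 1) (-1)).foldl
            (fun b nr => b && !(decide (nr < 0) || (cellM mat nr cc == some 'X'))) true
          if isMovable then [cr - distance, cc] else sp
        else sp
      | _ => sp  -- Python: unpacking [cr, cc] = startPos raises (no/multiple 'S'); outside Pre_
    | none => sp  -- Python: int(_distance) raises ValueError; outside Pre_
  | _ => sp  -- Python: the 2-element unpack of route.split(' ') raises ValueError; outside Pre_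

def solution (park : List String) (routes : List String) : List Int :=
  let width : Int := ((park.headD "").toList.length : Int)  -- len(park[0]); IndexError on [] is outside Pre_
  let height : Int := (park.length : Int)
  let mat0 : List (List Char) := park.map (fun row => row.toList)
  let scanned := scanFold mat0
  routes.foldl (aStep scanned.2 height width) scanned.1

-- ===== PORT B =====

-- l[i] on a known-nonneg in-range index (Python raises where pyGet? misses; every use below is
-- in range on inputs admitted by Pre_)
def idxI {α : Type} [Inhabited α] (l : List α) (i : Int) : α :=
  (PySem.List.pyGet? l i).getD default

-- prefix_x: acc = [0]; for ch in cells: acc.append(acc[-1] + (1 if ch == 'X' else 0))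
def prefixX (cells : List Char) : List Int :=
  cells.foldl (fun acc ch => acc ++ [acc.getLast! + (if ch = 'X' then 1 else 0)]) [(0 : Int)]

-- colx = [[0]*W]; for row in park: colx.append([p + (ch=='X') for p, ch in zip(colx[-1], row)])
def colPrefixes (w : Nat) (rows : List (List Char)) : List (List Int) :=
  rows.foldl
    (fun acc row => acc ++
      [List.zipWith (fun p ch => p + (if ch = 'X' then 1 else 0)) acc.getLast! row])
    [List.replicate w (0 : Int)]

-- [x for i, row in enumerate(park) for j, ch in enumerate(row) if ch == 'S' for x in (i, j)]
def startPositions (park : List String) : List Int :=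
  (PySem.List.enumerate park).flatMap (fun p =>
    (PySem.List.enumerate p.2.toList).flatMap (fun q =>
      if q.2 = 'S' then [p.1, q.1] else []))

def movesDelta : PySem.Dict String (Int × Int) :=
  PySem.Dict.ofList [("N", (-1, 0)), ("S", (1, 0)), ("W", (0, -1)), ("E", (0, 1))]

-- the body of B's `for route in routes` loop
def altStep (rowx colx : List (List Int)) (H W : Int) (pos : List Int) (route : String) : List Int :=
  match PySem.Str.split? route " " with
  | some [d, ns] =>
    match PySem.Int.ofStr? ns with
    | some n =>
      match pos with
      | [r, c] =>
        match PySem.Dict.get? movesDelta d with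
        | some dd =>
          let nr := r + dd.1 * n
          let nc := c + dd.2 * n
          if 0 ≤ nr ∧ nr < H ∧ 0 ≤ nc ∧ nc < W then
            let blocked :=
              if dd.1 ≠ 0 then
                idxI (idxI colx (max r nr + 1)) c - idxI (idxI colx (min r nr)) c
              else
                idxI (idxI rowx r) (max c nc + 1) - idxI (idxI rowx r) (min c nc)
            if blocked = 0 then [nr, nc] else pos
          else pos
        | none => pos  -- unknown direction: skipped, as in B's `if d in delta`
      | _ => pos  -- Python: `r, c = pos` raises (no/multiple 'S'); outside Pre_
    | none => pos  -- Python: int(ns) raises; outside Pre_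
  | _ => pos  -- Python: the 2-element unpack raises; outside Pre_

def solution_alt (park : List String) (routes : List String) : List Int :=
  let H : Int := (park.length : Int)
  let W : Int := ((park.headD "").toList.length : Int)  -- len(park[0]); IndexError on [] is outside Pre_
  let rowx := park.map (fun row => prefixX row.toList)
  let colx := colPrefixes (park.headD "").toList.length (park.map (fun row => row.toList))
  let pos := startPositions park
  routes.foldl (altStep rowx colx H W) pos

-- ===== PRECONDITION & SPEC =====

-- route is "<dir> <nonnegative int>": exactly one space, the second field a Python int literal ≥ 0
def routeOk (route : String) : Bool :=
  match PySem.Str.split? route " " with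
  | some [_, ns] =>
    match PySem.Int.ofStr? ns with
    | some n => decide (0 ≤ n)
    | none => false
  | _ => false

-- Pre_ restricts to the problem's natural domain: a nonempty park, and routes of the form
-- "<dir> <nonnegative int>" over a rectangular park with exactly one start cell 'S'; outside it A
-- raises (empty park, malformed route, no/multiple 'S' with nonempty routes) or returns accidental
-- values A's own walk produces only via Python quirks (ragged parks mid-walk, negative distances
-- moving via negative-index wraparound — see the cited examples).
def Pre_solution (park : List String) (routes : List String) : Prop :=
  park ≠ [] ∧
  (∀ route ∈ routes, routeOk route = true) ∧
  (routes = [] ∨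
    ((park.flatMap (fun row => row.toList)).count 'S' = 1 ∧
     ∀ row ∈ park, row.toList.length = (park.headD "").toList.length))

instance (park : List String) (routes : List String) : Decidable (Pre_solution park routes) := by
  unfold Pre_solution; infer_instance

def pvWitness_solution : List String × List String := (["SO", "XO"], ["E 1", "S 1", "W 1"])

def Spec_solution (park : List String) (routes : List String) (out : List Int) : Prop := out = solution_alt park routes
instance (park : List String) (routes : List String) (out : List Int) : Decidable (Spec_solution park routes out) := by unfold Spec_solution; infer_instance

-- ===== CLAIM (what is proved, stated in full; the proofs are below) =====
def Claim_equal_solution : Prop := ∀ (park : List String) (routes : List String), Dom_solution park routes → Pre_solution park routes → Spec_solution park routes (solution park routes)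

-- ===== LEMMAS AND PROOFS =====

-- m[r][c] on Nat indices (what both programs read inside the grid)
def cellN (m : List (List Char)) (r c : Nat) : Option Char := m[r]?.bind (fun rw => rw[c]?)

-- the row-major list of 'S' positions of a matrix (enumerated from row s)
def sIdxL (L : List (Int × List Char)) : List (Int × Int) :=
  L.flatMap (fun p => ((PySem.List.enumerate p.2).filter (fun q => q.2 == 'S')).map (fun q => (p.1, q.1)))

def sIdx (m : List (List Char)) : List (Int × Int) := sIdxL (PySem.List.enumerate m)

-- ---- generic small facts ----

-- a `for` loop that only clears a flag: `b and not f(x)` folded over l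
theorem foldl_band_any {α : Type} (l : List α) (f : α → Bool) (b : Bool) :
    l.foldl (fun acc x => acc && !(f x)) b = (b && !(l.any f)) := by
  induction l generalizing b with
  | nil => simp
  | cons x t ih => simp [ih, Bool.and_assoc]

theorem getElem?_modify' {α : Type} (l : List α) (i : Nat) (f : α → α) (j : Nat) :
    (l.modify i f)[j]? = if i = j then l[j]?.map f else l[j]? := by
  simp only [List.getElem?_modify]
  split <;> cases l[j]? <;> simp

theorem getLast!_concat {α : Type} [Inhabited α] (l : List α) (v : α) : (l ++ [v]).getLast! = v := by
  induction l with
  | nil => rfl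
  | cons a t ih =>
    cases t with
    | nil => rfl
    | cons b u => simpa [List.getLast!] using ih

theorem zipWith_getElem? {α β γ : Type} (f : α → β → γ) (as : List α) (bs : List β) (i : Nat) :
    (List.zipWith f as bs)[i]? = as[i]?.bind (fun a => bs[i]?.map (f a)) := by
  induction as generalizing bs i with
  | nil => simp
  | cons a t ih =>
    cases bs with
    | nil => simp
    | cons b u => cases i with
      | zero => simp
      | succ k => simpa using ih u k

-- ---- splitting A's scan loop into its two independent accumulators ----

theorem scanRow_split (i : Int) (l : List (Int × Char)) :
    ∀ (sp : List Int) (m : List (List Char)),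
    l.foldl (fun (st : List Int × List (List Char)) q =>
        if q.2 = 'S' then
          (st.1 ++ [i, q.1], st.2.modify i.toNat (fun rw => rw.set q.1.toNat 'O'))
        else st) (sp, m)
    = (l.foldl (fun s q => if q.2 = 'S' then s ++ [i, q.1] else s) sp,
       l.foldl (fun mm q => if q.2 = 'S' then mm.modify i.toNat (fun rw => rw.set q.1.toNat 'O') else mm) m) := by
  induction l with
  | nil => intro sp m; rfl
  | cons q t ih => intro sp m; by_cases h : q.2 = 'S' <;> simp [h, ih]

def spFold (m : List (List Char)) : List Int :=
  (PySem.List.enumerate m).foldl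
    (fun s p => (PySem.List.enumerate p.2).foldl
      (fun s q => if q.2 = 'S' then s ++ [p.1, q.1] else s) s) []

def matFold (m : List (List Char)) : List (List Char) :=
  (PySem.List.enumerate m).foldl
    (fun mm p => (PySem.List.enumerate p.2).foldl
      (fun mm q => if q.2 = 'S' then mm.modify p.1.toNat (fun rw => rw.set q.1.toNat 'O') else mm) mm) m

theorem scan_split (L : List (Int × List Char)) :
    ∀ (sp : List Int) (m0 : List (List Char)),
    L.foldl (fun (st : List Int × List (List Char)) p =>
        (PySem.List.enumerate p.2).foldl
          (fun (st : List Int × List (List Char)) q =>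
            if q.2 = 'S' then
              (st.1 ++ [p.1, q.1], st.2.modify p.1.toNat (fun rw => rw.set q.1.toNat 'O'))
            else st) st) (sp, m0)
    = (L.foldl (fun s p => (PySem.List.enumerate p.2).foldl
          (fun s q => if q.2 = 'S' then s ++ [p.1, q.1] else s) s) sp,
       L.foldl (fun mm p => (PySem.List.enumerate p.2).foldl
          (fun mm q => if q.2 = 'S' then mm.modify p.1.toNat (fun rw => rw.set q.1.toNat 'O') else mm) mm) m0) := by
  induction L with
  | nil => intro sp m0; rfl
  | cons p t ih =>
    intro sp m0
    simp only [List.foldl_cons]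
    rw [scanRow_split p.1 (PySem.List.enumerate p.2) sp m0, ih]

theorem scanFold_eq (m : List (List Char)) : scanFold m = (spFold m, matFold m) := by
  unfold scanFold spFold matFold
  exact scan_split (PySem.List.enumerate m) [] m

-- ---- the startPos accumulator is the flattened list of 'S' positions ----

theorem rowSp (i : Int) (l : List (Int × Char)) (s : List Int) :
    l.foldl (fun s q => if q.2 = 'S' then s ++ [i, q.1] else s) s
      = s ++ ((l.filter (fun q => q.2 == 'S')).map (fun q => ((i, q.1) : Int × Int))).flatMap
          (fun rc => [rc.1, rc.2]) := by
  induction l generalizing s with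
  | nil => simp
  | cons q t ih => by_cases h : q.2 = 'S' <;> simp [h, ih]

theorem spFoldL_eq (L : List (Int × List Char)) :
    ∀ (s : List Int),
    L.foldl (fun s p => (PySem.List.enumerate p.2).foldl
        (fun s q => if q.2 = 'S' then s ++ [p.1, q.1] else s) s) s
      = s ++ (sIdxL L).flatMap (fun rc => [rc.1, rc.2]) := by
  induction L with
  | nil => intro s; simp [sIdxL]
  | cons p t ih =>
    intro s
    simp only [List.foldl_cons, rowSp p.1 (PySem.List.enumerate p.2) s, ih, sIdxL,
      List.flatMap_cons, List.flatMap_map, List.flatMap_append, List.append_assoc]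

theorem spFold_eq (m : List (List Char)) :
    spFold m = (sIdx m).flatMap (fun rc => [rc.1, rc.2]) := by
  unfold spFold sIdx
  simpa using spFoldL_eq (PySem.List.enumerate m) []

-- ---- the mat accumulator only rewrites 'S' cells to 'O'; 'X'-ness of every cell is unchanged ----

theorem rowMat (i : Int) (l : List (Int × Char)) (m : List (List Char)) :
    l.foldl (fun mm q => if q.2 = 'S' then mm.modify i.toNat (fun rw => rw.set q.1.toNat 'O') else mm) m
      = (((l.filter (fun q => q.2 == 'S')).map (fun q => ((i, q.1) : Int × Int))).foldl
          (fun mm rc => mm.modify rc.1.toNat (fun rw => rw.set rc.2.toNat 'O')) m) := by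
  induction l generalizing m with
  | nil => simp
  | cons q t ih => by_cases h : q.2 = 'S' <;> simp [h, ih]

theorem matFoldL_eq (L : List (Int × List Char)) :
    ∀ (m0 : List (List Char)),
    L.foldl (fun mm p => (PySem.List.enumerate p.2).foldl
        (fun mm q => if q.2 = 'S' then mm.modify p.1.toNat (fun rw => rw.set q.1.toNat 'O') else mm) mm) m0
      = (sIdxL L).foldl (fun mm rc => mm.modify rc.1.toNat (fun rw => rw.set rc.2.toNat 'O')) m0 := by
  induction L with
  | nil => intro m0; simp [sIdxL]
  | cons p t ih =>
    intro m0
    simp only [List.foldl_cons, rowMat p.1 (PySem.List.enumerate p.2) m0, ih, sIdxL,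
      List.flatMap_cons, List.foldl_append]

theorem matFold_eq (m : List (List Char)) :
    matFold m = (sIdx m).foldl (fun mm rc => mm.modify rc.1.toNat (fun rw => rw.set rc.2.toNat 'O')) m := by
  unfold matFold sIdx
  exact matFoldL_eq (PySem.List.enumerate m) m

theorem cellN_modify_set (m : List (List Char)) (i j : Nat) (h : cellN m i j ≠ some 'X')
    (r c : Nat) :
    (cellN (m.modify i (fun rw => rw.set j 'O')) r c = some 'X') ↔ (cellN m r c = some 'X') := by
  unfold cellN
  rw [getElem?_modify' m i _ r]
  by_cases hri : i = r
  · subst hri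
    rw [if_pos rfl]
    cases hm : m[i]? with
    | none => simp
    | some rw =>
      simp only [Option.map_some, Option.bind_some, List.getElem?_set]
      by_cases hjc : j = c
      · subst hjc
        by_cases hlt : j < rw.length
        · simp only [if_pos hlt]
          unfold cellN at h
          rw [hm] at h
          simp only [Option.bind_some] at h
          constructor
          · intro hx; simp at hx
          · intro hx; exact absurd hx h
        · simp [hlt]
      · simp [hjc]
  · simp [hri]

theorem fold_modify_X (L : List (Int × Int)) :
    ∀ (m m0 : List (List Char)),
    (∀ r c : Nat, cellN m r c = some 'X' ↔ cellN m0 r c = some 'X') →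
    (∀ rc ∈ L, 0 ≤ rc.1 ∧ 0 ≤ rc.2 ∧ cellN m0 rc.1.toNat rc.2.toNat = some 'S') →
    ∀ r c : Nat,
      cellN (L.foldl (fun mm rc => mm.modify rc.1.toNat (fun rw => rw.set rc.2.toNat 'O')) m) r c = some 'X'
      ↔ cellN m0 r c = some 'X' := by
  induction L with
  | nil => intro m m0 hx _ r c; exact hx r c
  | cons rc t ih =>
    intro m m0 hx hmem r c
    simp only [List.foldl_cons]
    have h0 := hmem rc (by simp)
    have hne : cellN m rc.1.toNat rc.2.toNat ≠ some 'X' := by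
      intro hcon
      rw [hx _ _, h0.2.2] at hcon
      simp at hcon
    exact ih _ m0
      (fun r c => (cellN_modify_set m rc.1.toNat rc.2.toNat hne r c).trans (hx r c))
      (fun rc h => hmem rc (by simp [h])) r c

-- every position in sIdx is an in-range 'S' cell
theorem mem_sIdx (m : List (List Char)) (rc : Int × Int) (h : rc ∈ sIdx m) :
    ∃ (i j : Nat), rc = ((i : Int), (j : Int)) ∧ ∃ (hi : i < m.length) (hj : j < m[i].length),
      m[i][j] = 'S' := by
  unfold sIdx sIdxL at h
  rw [List.mem_flatMap] at h
  obtain ⟨p, hp, hrc⟩ := h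
  rw [List.mem_map] at hrc
  obtain ⟨q, hq, rfl⟩ := hrc
  rw [List.mem_filter] at hq
  obtain ⟨hq, hqS⟩ := hq
  rw [PySem.List.mem_enumerate_iff] at hp
  obtain ⟨i, hi, rfl⟩ := hp
  rw [PySem.List.mem_enumerate_iff] at hq
  obtain ⟨j, hj, rfl⟩ := hq
  refine ⟨i, j, by simp, hi, hj, by simpa using hqS⟩

-- ---- B's comprehension lists the same 'S' positions ----

theorem rowPos (i : Int) (l : List (Int × Char)) :
    l.flatMap (fun q => if q.2 = 'S' then [i, q.1] else [])
      = ((l.filter (fun q => q.2 == 'S')).map (fun q => ((i, q.1) : Int × Int))).flatMap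
          (fun rc => [rc.1, rc.2]) := by
  induction l with
  | nil => rfl
  | cons q t ih => by_cases h : q.2 = 'S' <;> simp [h, ih]

theorem startPositions_auxL (l : List String) : ∀ s : Int,
    (PySem.List.enumerate l s).flatMap (fun p =>
      (PySem.List.enumerate p.2.toList).flatMap (fun q =>
        if q.2 = 'S' then [p.1, q.1] else []))
    = (sIdxL (PySem.List.enumerate (l.map (fun r => r.toList)) s)).flatMap
        (fun rc => [rc.1, rc.2]) := by
  induction l with
  | nil => intro s; rfl
  | cons r t ih =>
    intro s
    simp only [List.map_cons, PySem.List.enumerate_cons, List.flatMap_cons, sIdxL,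
      List.flatMap_append]
    rw [rowPos s (PySem.List.enumerate r.toList 0), ih (s + 1)]
    rfl

theorem startPositions_eq (park : List String) :
    startPositions park = (sIdx (park.map (fun r => r.toList))).flatMap (fun rc => [rc.1, rc.2]) := by
  unfold startPositions sIdx
  exact startPositions_auxL park 0

-- ---- counting 'S' cells ----

theorem filter_enumerate_length (cs : List Char) : ∀ s : Int,
    ((PySem.List.enumerate cs s).filter (fun q => q.2 == 'S')).length = cs.count 'S' := by
  induction cs with
  | nil => intro s; rfl
  | cons ch t ih =>
    intro s
    by_cases h : ch = 'S' <;>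
      simp [PySem.List.enumerate_cons, h, ih (s + 1)]

theorem sIdxL_length (l : List (List Char)) : ∀ s : Int,
    (sIdxL (PySem.List.enumerate l s)).length = l.flatten.count 'S' := by
  induction l with
  | nil => intro s; rfl
  | cons row t ih =>
    intro s
    have h2 := ih (s + 1)
    simp only [sIdxL] at h2 ⊢
    simp [PySem.List.enumerate_cons, List.flatten_cons, List.count_append,
      filter_enumerate_length row 0, h2]

theorem sIdx_length (m : List (List Char)) : (sIdx m).length = m.flatten.count 'S' := by
  unfold sIdx
  exact sIdxL_length m 0

-- ---- reading one cell ----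

theorem cellM_nonneg (mat : List (List Char)) (a b : Int) (ha : 0 ≤ a) (hb : 0 ≤ b) :
    cellM mat a b = cellN mat a.toNat b.toNat := by
  unfold cellM cellN
  rw [PySem.List.pyGet?_of_nonneg _ ha]
  cases mat[a.toNat]? <;> simp [PySem.List.pyGet?_of_nonneg _ hb]

theorem cellMN (mat m : List (List Char))
    (hX : ∀ a b : Nat, cellN mat a b = some 'X' ↔ cellN m a b = some 'X')
    (a b : Int) (ha : 0 ≤ a) (hb : 0 ≤ b) :
    (cellM mat a b = some 'X') ↔ (cellN m a.toNat b.toNat = some 'X') := by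
  rw [cellM_nonneg _ _ _ ha hb]
  exact hX _ _

-- ---- the moves dictionary on the four direction letters ----

theorem get_moves_N : PySem.Dict.get? movesDelta "N" = some (-1, 0) := by decide
theorem get_moves_S : PySem.Dict.get? movesDelta "S" = some (1, 0) := by decide
theorem get_moves_W : PySem.Dict.get? movesDelta "W" = some (0, -1) := by decide
theorem get_moves_E : PySem.Dict.get? movesDelta "E" = some (0, 1) := by decide

theorem get_moves_other (d : String) (h1 : d ≠ "N") (h2 : d ≠ "S") (h3 : d ≠ "W") (h4 : d ≠ "E") :
    PySem.Dict.get? movesDelta d = none := by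
  have e : movesDelta = PySem.Dict.mk [("N", (-1, 0)), ("S", (1, 0)), ("W", (0, -1)), ("E", (0, 1))] := by
    decide
  rw [e, PySem.Dict.get?_mk_cons, PySem.Dict.get?_mk_cons, PySem.Dict.get?_mk_cons,
    PySem.Dict.get?_mk_cons]
  simp [Ne.symm h1, Ne.symm h2, Ne.symm h3, Ne.symm h4]
  rfl

-- ---- characterizing B's prefix tables ----

-- the tail of prefix_x's accumulator after start value s
def pxAux (s : Int) : List Char → List Int
  | [] => []
  | ch :: t => (s + (if ch = 'X' then 1 else 0)) :: pxAux (s + (if ch = 'X' then 1 else 0)) t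

theorem foldl_px (cs : List Char) : ∀ (acc : List Int), acc ≠ [] →
    cs.foldl (fun acc ch => acc ++ [acc.getLast! + (if ch = 'X' then 1 else 0)]) acc
      = acc ++ pxAux acc.getLast! cs := by
  induction cs with
  | nil => intro acc _; simp [pxAux]
  | cons ch t ih =>
    intro acc hne
    simp only [List.foldl_cons]
    rw [ih _ (by simp), getLast!_concat, pxAux]
    simp

def rowSeg (rwl : List Char) (k : Nat) : Int := ((rwl.take k).count 'X' : Int)

theorem pxAux_get (cs : List Char) : ∀ (s : Int) (k : Nat), k < cs.length →
    (pxAux s cs)[k]? = some (s + rowSeg cs (k + 1)) := by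
  induction cs with
  | nil => intro s k h; simp at h
  | cons ch t ih =>
    intro s k hk
    cases k with
    | zero => by_cases h : ch = 'X' <;> simp [pxAux, rowSeg, h]
    | succ k =>
      have h2 := ih (s + (if ch = 'X' then 1 else 0)) k (by simpa using hk)
      unfold rowSeg at h2 ⊢
      simp only [pxAux, List.getElem?_cons_succ, List.take_succ_cons, List.count_cons]
      rw [h2]
      congr 1
      by_cases h : ch = 'X' <;> simp [h] <;> push_cast <;> omega

theorem prefixX_get (cs : List Char) (i : Nat) (hi : i ≤ cs.length) :
    (prefixX cs)[i]? = some (rowSeg cs i) := by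
  unfold prefixX
  rw [foldl_px cs [0] (by simp)]
  cases i with
  | zero => simp [rowSeg]
  | succ k =>
    have hk : k < cs.length := by omega
    have hgl : ([(0 : Int)]).getLast! = 0 := rfl
    rw [hgl, List.singleton_append, List.getElem?_cons_succ, pxAux_get cs 0 k hk, zero_add]

-- the tail of colx's accumulator after prefix row prev
def cpAux (prev : List Int) : List (List Char) → List (List Int)
  | [] => []
  | row :: t =>
      List.zipWith (fun p ch => p + (if ch = 'X' then 1 else 0)) prev row ::
        cpAux (List.zipWith (fun p ch => p + (if ch = 'X' then 1 else 0)) prev row) t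

theorem foldl_cp (rows : List (List Char)) : ∀ (acc : List (List Int)), acc ≠ [] →
    rows.foldl
      (fun acc row => acc ++
        [List.zipWith (fun p ch => p + (if ch = 'X' then 1 else 0)) acc.getLast! row]) acc
      = acc ++ cpAux acc.getLast! rows := by
  induction rows with
  | nil => intro acc _; simp [cpAux]
  | cons row t ih =>
    intro acc hne
    simp only [List.foldl_cons]
    rw [ih _ (by simp), getLast!_concat, cpAux]
    simp

def colSeg (m : List (List Char)) (k j : Nat) : Int :=
  (((m.take k).filterMap (fun rwl => rwl[j]?)).count 'X' : Int)

theorem colSeg_cons (row : List Char) (t : List (List Char)) (j k : Nat) (hj : j < row.length) :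
    colSeg (row :: t) (k + 1) j = (if row[j] = 'X' then (1 : Int) else 0) + colSeg t k j := by
  unfold colSeg
  rw [List.take_succ_cons, List.filterMap_cons]
  rw [List.getElem?_eq_getElem hj]
  by_cases h : row[j] = 'X' <;> simp [h] <;> push_cast <;> ring

theorem cpAux_get (L : Nat) (rows : List (List Char)) (hrect : ∀ rwl ∈ rows, rwl.length = L) :
    ∀ (prev : List Int), prev.length = L →
    ∀ (i : Nat), i < rows.length → ∀ (j : Nat), j < L →
    ((cpAux prev rows)[i]?.getD [])[j]? = some (prev[j]?.getD 0 + colSeg rows (i + 1) j) := by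
  induction rows with
  | nil => intro prev _ i hi; simp at hi
  | cons row t ih =>
    intro prev hp i hi j hj
    have hrow : row.length = L := hrect row (by simp)
    have hnxt : (List.zipWith (fun p ch => p + (if ch = 'X' then (1 : Int) else 0)) prev row).length = L := by
      simp [hp, hrow]
    have hzv : ∀ (j' : Nat) (hj' : j' < L),
        (List.zipWith (fun p ch => p + (if ch = 'X' then (1 : Int) else 0)) prev row)[j']?
          = some (prev[j']?.getD 0 + (if row[j']'(by rw [hrow]; exact hj') = 'X' then (1 : Int) else 0)) := by
      intro j' hj'
      rw [zipWith_getElem?, List.getElem?_eq_getElem (by rw [hp]; exact hj'),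
        List.getElem?_eq_getElem (by rw [hrow]; exact hj')]
      simp
    cases i with
    | zero =>
      simp only [cpAux, List.getElem?_cons_zero, Option.getD_some]
      rw [hzv j hj, colSeg_cons row t j 0 (by omega)]
      have : colSeg t 0 j = 0 := by simp [colSeg]
      rw [this]
      ring_nf
    | succ i =>
      simp only [cpAux, List.getElem?_cons_succ]
      rw [ih (fun rwl h => hrect rwl (by simp [h])) _ hnxt i (by simpa using hi) j hj]
      rw [hzv j hj, colSeg_cons row t j (i + 1) (by omega)]
      simp only [Option.getD_some]
      ring_nf

-- value of B's tables at in-range indices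
theorem rowx_val (m : List (List Char)) (r i : Int) (hr0 : 0 ≤ r) (hrH : r.toNat < m.length)
    (hi0 : 0 ≤ i) (hile : i.toNat ≤ (m[r.toNat]'hrH).length) :
    idxI (idxI (m.map prefixX) r) i = rowSeg (m[r.toNat]'hrH) i.toNat := by
  unfold idxI
  rw [PySem.List.pyGet?_of_nonneg _ hr0, List.getElem?_map, List.getElem?_eq_getElem hrH]
  simp only [Option.map_some, Option.getD_some]
  rw [PySem.List.pyGet?_of_nonneg _ hi0, prefixX_get _ _ hile]
  rfl

theorem colx_val (L : Nat) (m : List (List Char)) (hrect : ∀ rwl ∈ m, rwl.length = L)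
    (i j : Int) (hi0 : 0 ≤ i) (hiH : i.toNat ≤ m.length) (hj0 : 0 ≤ j) (hjL : j.toNat < L) :
    idxI (idxI (colPrefixes L m) i) j = colSeg m i.toNat j.toNat := by
  unfold colPrefixes idxI
  simp only [show (default : List Int) = [] from rfl, show (default : Int) = 0 from rfl]
  rw [foldl_cp m [List.replicate L 0] (by simp)]
  have hgl : ([List.replicate L (0 : Int)]).getLast! = List.replicate L 0 := rfl
  rw [hgl, List.singleton_append, PySem.List.pyGet?_of_nonneg _ hi0,
    PySem.List.pyGet?_of_nonneg _ hj0]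
  cases hi : i.toNat with
  | zero =>
    simp [List.getElem?_replicate, hjL, colSeg]
  | succ k =>
    have hk : k < m.length := by omega
    rw [List.getElem?_cons_succ]
    rw [cpAux_get L m hrect (List.replicate L 0) (by simp) k hk j.toNat hjL]
    simp [List.getElem?_replicate, hjL]

-- ---- a zero prefix-sum difference means no 'X' on the segment ----

theorem rowSeg_sub (rwl : List Char) (lo hi : Nat) (hlo : lo ≤ hi) (hhi : hi < rwl.length) :
    (rowSeg rwl (hi + 1) - rowSeg rwl lo = 0)
      ↔ ∀ i : Nat, lo ≤ i → i ≤ hi → ¬ rwl[i]? = some 'X' := by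
  unfold rowSeg
  have hsplit : rwl.take (hi + 1) = rwl.take lo ++ ((rwl.take (hi + 1)).drop lo) := by
    conv_lhs => rw [← List.take_append_drop lo (rwl.take (hi + 1))]
    rw [List.take_take]
    congr 2
    omega
  rw [hsplit, List.count_append]
  have hlen : ((rwl.take (hi + 1)).drop lo).length = hi + 1 - lo := by
    simp [List.length_drop, List.length_take]
    omega
  have hgv : ∀ k : Nat, k < hi + 1 - lo → ((rwl.take (hi + 1)).drop lo)[k]? = rwl[lo + k]? := by
    intro k hk
    rw [List.getElem?_eq_getElem (by omega : k < ((rwl.take (hi + 1)).drop lo).length),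
      List.getElem_drop, List.getElem_take,
      List.getElem?_eq_getElem (by omega : lo + k < rwl.length)]
  constructor
  · intro h i h1 h2 hcon
    have hz : ((rwl.take (hi + 1)).drop lo).count 'X' = 0 := by omega
    rw [List.count_eq_zero] at hz
    apply hz
    rw [List.mem_iff_getElem?]
    refine ⟨i - lo, ?_⟩
    rw [hgv (i - lo) (by omega), show lo + (i - lo) = i from by omega]
    exact hcon
  · intro h
    have hz : ((rwl.take (hi + 1)).drop lo).count 'X' = 0 := by
      rw [List.count_eq_zero]
      intro hmem
      rw [List.mem_iff_getElem?] at hmem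
      obtain ⟨k, hk⟩ := hmem
      have hklen : k < ((rwl.take (hi + 1)).drop lo).length := by
        by_contra hge
        rw [List.getElem?_eq_none (by omega)] at hk
        simp at hk
      exact h (lo + k) (by omega) (by omega) (by rw [← hgv k (by omega)]; exact hk)
    omega

theorem filterMap_take_all_some {α β : Type} (f : α → Option β) :
    ∀ (l : List α), (∀ x ∈ l, (f x).isSome) → ∀ k : Nat,
    (l.take k).filterMap f = (l.filterMap f).take k := by
  intro l
  induction l with
  | nil => intro _ k; simp
  | cons a t ih =>
    intro hall k
    cases k with
    | zero => simp
    | succ k =>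
      have ha := hall a (by simp)
      obtain ⟨b, hb⟩ := Option.isSome_iff_exists.mp ha
      simp only [List.take_succ_cons, List.filterMap_cons, hb]
      rw [ih (fun x hx => hall x (by simp [hx])) k]

theorem filterMap_all_some_length {α β : Type} (f : α → Option β) :
    ∀ (l : List α), (∀ x ∈ l, (f x).isSome) → (l.filterMap f).length = l.length := by
  intro l
  induction l with
  | nil => intro _; simp
  | cons a t ih =>
    intro hall
    obtain ⟨b, hb⟩ := Option.isSome_iff_exists.mp (hall a (by simp))
    simp [List.filterMap_cons, hb, ih (fun x hx => hall x (by simp [hx]))]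

theorem filterMap_all_some_getElem? {α β : Type} (f : α → Option β) :
    ∀ (l : List α), (∀ x ∈ l, (f x).isSome) → ∀ (i : Nat) (hi : i < l.length),
    (l.filterMap f)[i]? = f (l[i]'hi) := by
  intro l
  induction l with
  | nil => intro _ i hi; simp at hi
  | cons a t ih =>
    intro hall i hi
    obtain ⟨b, hb⟩ := Option.isSome_iff_exists.mp (hall a (by simp))
    cases i with
    | zero => simp [List.filterMap_cons, hb]
    | succ i =>
      simp only [List.filterMap_cons, hb, List.getElem?_cons_succ, List.getElem_cons_succ]
      exact ih (fun x hx => hall x (by simp [hx])) i (by simpa using hi)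

theorem colSeg_sub (m : List (List Char)) (L j lo hi : Nat) (hrect : ∀ rwl ∈ m, rwl.length = L)
    (hj : j < L) (hlo : lo ≤ hi) (hhi : hi < m.length) :
    (colSeg m (hi + 1) j - colSeg m lo j = 0)
      ↔ ∀ i : Nat, lo ≤ i → i ≤ hi → ¬ cellN m i j = some 'X' := by
  have hall : ∀ rwl ∈ m, (rwl[j]?).isSome = true := by
    intro rwl hm
    have := hrect rwl hm
    simp [List.getElem?_eq_getElem (by omega : j < rwl.length)]
  have hlen : (m.filterMap (fun rwl => rwl[j]?)).length = m.length :=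
    filterMap_all_some_length _ m hall
  have hcs : ∀ k : Nat, colSeg m k j = rowSeg (m.filterMap (fun rwl => rwl[j]?)) k := by
    intro k
    unfold colSeg rowSeg
    rw [filterMap_take_all_some _ m hall k]
  rw [hcs, hcs, rowSeg_sub (m.filterMap (fun rwl => rwl[j]?)) lo hi hlo (by omega)]
  constructor
  · intro h i h1 h2 hcon
    apply h i h1 h2
    rw [filterMap_all_some_getElem? _ m hall i (by omega)]
    unfold cellN at hcon
    rw [List.getElem?_eq_getElem (show i < m.length by omega)] at hcon
    simpa using hcon
  · intro h i h1 h2 hcon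
    apply h i h1 h2
    unfold cellN
    rw [List.getElem?_eq_getElem (show i < m.length by omega)]
    rw [filterMap_all_some_getElem? _ m hall i (by omega)] at hcon
    simpa using hcon

-- ---- the per-route check, as one Prop both programs decide ----

def ClearUpto (m : List (List Char)) (H W r c dr dc n : Int) : Prop :=
  ∀ k : Int, 1 ≤ k → k < n + 1 →
    0 ≤ r + dr * k ∧ r + dr * k < H ∧ 0 ≤ c + dc * k ∧ c + dc * k < W ∧
      ¬ cellN m (r + dr * k).toNat (c + dc * k).toNat = some 'X'

-- A's four walk loops decide ClearUpto (hX carries the S→O rewrite back to the original grid)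
theorem A_S_iff (m mat : List (List Char))
    (hX : ∀ a b : Nat, cellN mat a b = some 'X' ↔ cellN m a b = some 'X')
    (H W r c n : Int) (hr0 : 0 ≤ r) (_hrH : r < H) (hc0 : 0 ≤ c) (hcW : c < W) :
    ((!((PySem.List.pyRange (r + 1) (r + n + 1) 1).any (fun nr =>
        decide (H ≤ nr) || (cellM mat nr c == some 'X')))) = true)
    ↔ ClearUpto m H W r c 1 0 n := by
  rw [Bool.not_eq_true', List.any_eq_false]
  unfold ClearUpto
  constructor
  · intro h k h1 h2
    have hnr := h (r + k) (by rw [PySem.List.mem_pyRange_one]; omega)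
    simp only [Bool.or_eq_true, decide_eq_true_eq, beq_iff_eq, not_or] at hnr
    obtain ⟨hnr1, hnr2⟩ := hnr
    have e1 : r + 1 * k = r + k := by ring
    have e2 : c + 0 * k = c := by ring
    rw [e1, e2]
    refine ⟨by omega, by omega, hc0, hcW, ?_⟩
    rw [← cellMN mat m hX (r + k) c (by omega) hc0]
    exact hnr2
  · intro h nr hmem
    rw [PySem.List.mem_pyRange_one] at hmem
    have hk := h (nr - r) (by omega) (by omega)
    have e1 : r + 1 * (nr - r) = nr := by ring
    have e2 : c + 0 * (nr - r) = c := by ring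
    rw [e1, e2] at hk
    simp only [Bool.or_eq_true, decide_eq_true_eq, beq_iff_eq, not_or]
    exact ⟨by omega, by rw [cellMN mat m hX nr c (by omega) hc0]; exact hk.2.2.2.2⟩

theorem A_E_iff (m mat : List (List Char))
    (hX : ∀ a b : Nat, cellN mat a b = some 'X' ↔ cellN m a b = some 'X')
    (H W r c n : Int) (hr0 : 0 ≤ r) (hrH : r < H) (hc0 : 0 ≤ c) (_hcW : c < W) :
    ((!((PySem.List.pyRange (c + 1) (c + n + 1) 1).any (fun nc =>
        decide (W ≤ nc) || (cellM mat r nc == some 'X')))) = true)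
    ↔ ClearUpto m H W r c 0 1 n := by
  rw [Bool.not_eq_true', List.any_eq_false]
  unfold ClearUpto
  constructor
  · intro h k h1 h2
    have hnc := h (c + k) (by rw [PySem.List.mem_pyRange_one]; omega)
    simp only [Bool.or_eq_true, decide_eq_true_eq, beq_iff_eq, not_or] at hnc
    obtain ⟨hnc1, hnc2⟩ := hnc
    have e1 : r + 0 * k = r := by ring
    have e2 : c + 1 * k = c + k := by ring
    rw [e1, e2]
    refine ⟨hr0, hrH, by omega, by omega, ?_⟩
    rw [← cellMN mat m hX r (c + k) hr0 (by omega)]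
    exact hnc2
  · intro h nc hmem
    rw [PySem.List.mem_pyRange_one] at hmem
    have hk := h (nc - c) (by omega) (by omega)
    have e1 : r + 0 * (nc - c) = r := by ring
    have e2 : c + 1 * (nc - c) = nc := by ring
    rw [e1, e2] at hk
    simp only [Bool.or_eq_true, decide_eq_true_eq, beq_iff_eq, not_or]
    exact ⟨by omega, by rw [cellMN mat m hX r nc hr0 (by omega)]; exact hk.2.2.2.2⟩

theorem A_W_iff (m mat : List (List Char))
    (hX : ∀ a b : Nat, cellN mat a b = some 'X' ↔ cellN m a b = some 'X')
    (H W r c n : Int) (hr0 : 0 ≤ r) (hrH : r < H) (_hc0 : 0 ≤ c) (hcW : c < W) :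
    ((!((PySem.List.pyRange (c - 1) (c - n - 1) (-1)).any (fun nc =>
        decide (nc < 0) || (cellM mat r nc == some 'X')))) = true)
    ↔ ClearUpto m H W r c 0 (-1) n := by
  rw [Bool.not_eq_true', List.any_eq_false]
  unfold ClearUpto
  constructor
  · intro h k h1 h2
    have hnc := h (c - k) (by rw [PySem.List.mem_pyRange_neg_one]; omega)
    simp only [Bool.or_eq_true, decide_eq_true_eq, beq_iff_eq, not_or] at hnc
    obtain ⟨hnc1, hnc2⟩ := hnc
    have e1 : r + 0 * k = r := by ring
    have e2 : c + -1 * k = c - k := by ring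
    rw [e1, e2]
    refine ⟨hr0, hrH, by omega, by omega, ?_⟩
    rw [← cellMN mat m hX r (c - k) hr0 (by omega)]
    exact hnc2
  · intro h nc hmem
    rw [PySem.List.mem_pyRange_neg_one] at hmem
    have hk := h (c - nc) (by omega) (by omega)
    have e1 : r + 0 * (c - nc) = r := by ring
    have e2 : c + -1 * (c - nc) = nc := by ring
    rw [e1, e2] at hk
    simp only [Bool.or_eq_true, decide_eq_true_eq, beq_iff_eq, not_or]
    exact ⟨by omega, by rw [cellMN mat m hX r nc hr0 (by omega)]; exact hk.2.2.2.2⟩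

theorem A_N_iff (m mat : List (List Char))
    (hX : ∀ a b : Nat, cellN mat a b = some 'X' ↔ cellN m a b = some 'X')
    (H W r c n : Int) (_hr0 : 0 ≤ r) (hrH : r < H) (hc0 : 0 ≤ c) (hcW : c < W) :
    ((!((PySem.List.pyRange (r - 1) (r - n - 1) (-1)).any (fun nr =>
        decide (nr < 0) || (cellM mat nr c == some 'X')))) = true)
    ↔ ClearUpto m H W r c (-1) 0 n := by
  rw [Bool.not_eq_true', List.any_eq_false]
  unfold ClearUpto
  constructor
  · intro h k h1 h2
    have hnr := h (r - k) (by rw [PySem.List.mem_pyRange_neg_one]; omega)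
    simp only [Bool.or_eq_true, decide_eq_true_eq, beq_iff_eq, not_or] at hnr
    obtain ⟨hnr1, hnr2⟩ := hnr
    have e1 : r + -1 * k = r - k := by ring
    have e2 : c + 0 * k = c := by ring
    rw [e1, e2]
    refine ⟨by omega, by omega, hc0, hcW, ?_⟩
    rw [← cellMN mat m hX (r - k) c (by omega) hc0]
    exact hnr2
  · intro h nr hmem
    rw [PySem.List.mem_pyRange_neg_one] at hmem
    have hk := h (r - nr) (by omega) (by omega)
    have e1 : r + -1 * (r - nr) = nr := by ring
    have e2 : c + 0 * (r - nr) = c := by ring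
    rw [e1, e2] at hk
    simp only [Bool.or_eq_true, decide_eq_true_eq, beq_iff_eq, not_or]
    exact ⟨by omega, by rw [cellMN mat m hX nr c (by omega) hc0]; exact hk.2.2.2.2⟩

-- B's prefix-difference test decides ClearUpto too (one lemma per direction)
theorem seg_S (m : List (List Char)) (L : Nat) (hrect : ∀ rwl ∈ m, rwl.length = L)
    (r c n : Int) (hn : 0 ≤ n) (hr0 : 0 ≤ r) (hc0 : 0 ≤ c) (hcW : c < (L : Int))
    (hcell : ¬ cellN m r.toNat c.toNat = some 'X')
    (hb0 : 0 ≤ r + n) (hbH : r + n < (m.length : Int)) :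
    (colSeg m (r + n + 1).toNat c.toNat - colSeg m r.toNat c.toNat = 0)
      ↔ ClearUpto m (m.length : Int) (L : Int) r c 1 0 n := by
  rw [show (r + n + 1).toNat = (r + n).toNat + 1 by omega]
  rw [colSeg_sub m L c.toNat r.toNat (r + n).toNat hrect (by omega) (by omega) (by omega)]
  unfold ClearUpto
  constructor
  · intro h k h1 h2
    have e1 : r + 1 * k = r + k := by ring
    have e2 : c + 0 * k = c := by ring
    rw [e1, e2]
    exact ⟨by omega, by omega, hc0, hcW, h (r + k).toNat (by omega) (by omega)⟩
  · intro h i hi1 hi2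
    by_cases hir : i = r.toNat
    · rw [hir, show r.toNat = r.toNat from rfl]
      exact hcell
    · have hk := h ((i : Int) - r) (by omega) (by omega)
      rw [show r + 1 * ((i : Int) - r) = (i : Int) by ring,
        show c + 0 * ((i : Int) - r) = c by ring] at hk
      rw [show ((i : Int)).toNat = i by omega] at hk
      exact hk.2.2.2.2

theorem seg_N (m : List (List Char)) (L : Nat) (hrect : ∀ rwl ∈ m, rwl.length = L)
    (r c n : Int) (hn : 0 ≤ n) (hr0 : 0 ≤ r) (hrH : r < (m.length : Int))
    (hc0 : 0 ≤ c) (hcW : c < (L : Int))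
    (hcell : ¬ cellN m r.toNat c.toNat = some 'X')
    (hb0 : 0 ≤ r - n) :
    (colSeg m (r + 1).toNat c.toNat - colSeg m (r - n).toNat c.toNat = 0)
      ↔ ClearUpto m (m.length : Int) (L : Int) r c (-1) 0 n := by
  rw [show (r + 1).toNat = r.toNat + 1 by omega]
  rw [colSeg_sub m L c.toNat (r - n).toNat r.toNat hrect (by omega) (by omega) (by omega)]
  unfold ClearUpto
  constructor
  · intro h k h1 h2
    have e1 : r + -1 * k = r - k := by ring
    have e2 : c + 0 * k = c := by ring
    rw [e1, e2]
    exact ⟨by omega, by omega, hc0, hcW, h (r - k).toNat (by omega) (by omega)⟩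
  · intro h i hi1 hi2
    by_cases hir : i = r.toNat
    · rw [hir]
      exact hcell
    · have hk := h (r - (i : Int)) (by omega) (by omega)
      rw [show r + -1 * (r - (i : Int)) = (i : Int) by ring,
        show c + 0 * (r - (i : Int)) = c by ring] at hk
      rw [show ((i : Int)).toNat = i by omega] at hk
      exact hk.2.2.2.2

theorem cellN_row (m : List (List Char)) (r : Nat) (hr : r < m.length) (j : Nat) :
    cellN m r j = (m[r]'hr)[j]? := by
  unfold cellN
  rw [List.getElem?_eq_getElem hr]
  rfl

theorem seg_E (m : List (List Char)) (L : Nat) (hrect : ∀ rwl ∈ m, rwl.length = L)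
    (r c n : Int) (hn : 0 ≤ n) (hr0 : 0 ≤ r) (hrH : r < (m.length : Int))
    (hc0 : 0 ≤ c)
    (hcell : ¬ cellN m r.toNat c.toNat = some 'X')
    (hb0 : 0 ≤ c + n) (hbW : c + n < (L : Int)) :
    (rowSeg (m[r.toNat]'(by omega)) (c + n + 1).toNat - rowSeg (m[r.toNat]'(by omega)) c.toNat = 0)
      ↔ ClearUpto m (m.length : Int) (L : Int) r c 0 1 n := by
  have hrowlen : (m[r.toNat]'(by omega : r.toNat < m.length)).length = L :=
    hrect _ (List.getElem_mem _)
  rw [show (c + n + 1).toNat = (c + n).toNat + 1 by omega]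
  rw [rowSeg_sub (m[r.toNat]'(by omega)) c.toNat (c + n).toNat (by omega) (by omega)]
  unfold ClearUpto
  constructor
  · intro h k h1 h2
    have e1 : r + 0 * k = r := by ring
    have e2 : c + 1 * k = c + k := by ring
    rw [e1, e2]
    refine ⟨hr0, hrH, by omega, by omega, ?_⟩
    rw [cellN_row m r.toNat (by omega) (c + k).toNat]
    exact h (c + k).toNat (by omega) (by omega)
  · intro h i hi1 hi2
    by_cases hic : i = c.toNat
    · rw [hic, ← cellN_row m r.toNat (by omega)]
      exact hcell
    · have hk := h ((i : Int) - c) (by omega) (by omega)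
      rw [show r + 0 * ((i : Int) - c) = r by ring,
        show c + 1 * ((i : Int) - c) = (i : Int) by ring] at hk
      rw [show ((i : Int)).toNat = i by omega] at hk
      rw [← cellN_row m r.toNat (by omega)]
      exact hk.2.2.2.2

theorem seg_W (m : List (List Char)) (L : Nat) (hrect : ∀ rwl ∈ m, rwl.length = L)
    (r c n : Int) (hn : 0 ≤ n) (hr0 : 0 ≤ r) (hrH : r < (m.length : Int))
    (hc0 : 0 ≤ c) (hcW : c < (L : Int))
    (hcell : ¬ cellN m r.toNat c.toNat = some 'X')
    (hb0 : 0 ≤ c - n) :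
    (rowSeg (m[r.toNat]'(by omega)) (c + 1).toNat - rowSeg (m[r.toNat]'(by omega)) (c - n).toNat = 0)
      ↔ ClearUpto m (m.length : Int) (L : Int) r c 0 (-1) n := by
  have hrowlen : (m[r.toNat]'(by omega : r.toNat < m.length)).length = L :=
    hrect _ (List.getElem_mem _)
  rw [show (c + 1).toNat = c.toNat + 1 by omega]
  rw [rowSeg_sub (m[r.toNat]'(by omega)) (c - n).toNat c.toNat (by omega) (by omega)]
  unfold ClearUpto
  constructor
  · intro h k h1 h2
    have e1 : r + 0 * k = r := by ring
    have e2 : c + -1 * k = c - k := by ring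
    rw [e1, e2]
    refine ⟨hr0, hrH, by omega, by omega, ?_⟩
    rw [cellN_row m r.toNat (by omega) (c - k).toNat]
    exact h (c - k).toNat (by omega) (by omega)
  · intro h i hi1 hi2
    by_cases hic : i = c.toNat
    · rw [hic, ← cellN_row m r.toNat (by omega)]
      exact hcell
    · have hk := h (c - (i : Int)) (by omega) (by omega)
      rw [show r + 0 * (c - (i : Int)) = r by ring,
        show c + -1 * (c - (i : Int)) = (i : Int) by ring] at hk
      rw [show ((i : Int)).toNat = i by omega] at hk
      rw [← cellN_row m r.toNat (by omega)]
      exact hk.2.2.2.2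

-- ---- one route: A's walk equals B's prefix-difference test, and the position invariant holds ----

theorem step_eq (m mat : List (List Char)) (L : Nat)
    (hX : ∀ a b : Nat, cellN mat a b = some 'X' ↔ cellN m a b = some 'X')
    (hrect : ∀ rwl ∈ m, rwl.length = L)
    (r c : Int) (route : String)
    (hr0 : 0 ≤ r) (hrH : r < (m.length : Int)) (hc0 : 0 ≤ c) (hcW : c < (L : Int))
    (hcell : ¬ cellN m r.toNat c.toNat = some 'X')
    (hok : routeOk route = true) :
    aStep mat (m.length : Int) (L : Int) [r, c] route
      = altStep (m.map prefixX) (colPrefixes L m) (m.length : Int) (L : Int) [r, c] route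
    ∧ ∃ r' c', altStep (m.map prefixX) (colPrefixes L m) (m.length : Int) (L : Int) [r, c] route = [r', c']
        ∧ 0 ≤ r' ∧ r' < (m.length : Int) ∧ 0 ≤ c' ∧ c' < (L : Int)
        ∧ ¬ cellN m r'.toNat c'.toNat = some 'X' := by
  have hrowlen : (m[r.toNat]'(by omega : r.toNat < m.length)).length = L :=
    hrect _ (List.getElem_mem _)
  unfold routeOk at hok
  cases hsplit : PySem.Str.split? route " " with
  | none => rw [hsplit] at hok; simp at hok
  | some parts =>
    rw [hsplit] at hok
    rcases parts with _ | ⟨d, _ | ⟨ns, _ | ⟨z, rest⟩⟩⟩ <;> try simp at hok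
    cases hn : PySem.Int.ofStr? ns with
    | none => rw [hn] at hok; simp at hok
    | some n =>
      rw [hn] at hok
      simp only [decide_eq_true_eq] at hok
      simp only [aStep, altStep, hsplit, hn]
      by_cases hdS : d = "S"
      · subst hdS
        rw [get_moves_S]
        simp only [one_mul, zero_mul, add_zero, foldl_band_any, Bool.true_and, if_pos rfl]
        have hA := A_S_iff m mat hX (m.length : Int) (L : Int) r c n hr0 hrH hc0 hcW
        by_cases hbnd : (0 ≤ r + n ∧ r + n < ((m.length : Nat) : Int) ∧ 0 ≤ c ∧ c < ((L : Nat) : Int))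
        · rw [if_pos hbnd, if_pos (by norm_num : ¬((1 : Int) = 0)),
            max_eq_right (by omega : r ≤ r + n), min_eq_left (by omega : r ≤ r + n),
            colx_val L m hrect (r + n + 1) c (by omega) (by omega) hc0 (by omega),
            colx_val L m hrect r c hr0 (by omega) hc0 (by omega)]
          have hseg := seg_S m L hrect r c n hok hr0 hc0 hcW hcell (by omega) (by omega)
          by_cases hmv : ClearUpto m (m.length : Int) (L : Int) r c 1 0 n
          · rw [if_pos (hA.mpr hmv), if_pos (hseg.mpr hmv)]
            refine ⟨rfl, r + n, c, rfl, by omega, by omega, hc0, hcW, ?_⟩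
            by_cases hn0 : n = 0
            · subst hn0; simpa using hcell
            · have hk := hmv n (by omega) (by omega)
              simp only [one_mul, zero_mul, add_zero] at hk
              exact hk.2.2.2.2
          · rw [if_neg (fun h => hmv (hA.mp h)), if_neg (fun h => hmv (hseg.mp h))]
            exact ⟨rfl, r, c, rfl, hr0, hrH, hc0, hcW, hcell⟩
        · rw [if_neg hbnd]
          have hnmv : ¬ ClearUpto m (m.length : Int) (L : Int) r c 1 0 n := by
            intro hmv
            apply hbnd
            by_cases hn0 : n = 0
            · subst hn0; exact ⟨by omega, by omega, hc0, hcW⟩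
            · obtain ⟨a1, a2, a3, a4, -⟩ := hmv n (by omega) (by omega)
              exact ⟨by omega, by omega, hc0, hcW⟩
          rw [if_neg (fun h => hnmv (hA.mp h))]
          exact ⟨rfl, r, c, rfl, hr0, hrH, hc0, hcW, hcell⟩
      · by_cases hdE : d = "E"
        · subst hdE
          rw [get_moves_E]
          simp only [one_mul, zero_mul, add_zero, foldl_band_any, Bool.true_and,
            if_neg (by decide : ¬("E" : String) = "S"), if_pos rfl]
          have hA := A_E_iff m mat hX (m.length : Int) (L : Int) r c n hr0 hrH hc0 hcW
          by_cases hbnd : (0 ≤ r ∧ r < ((m.length : Nat) : Int) ∧ 0 ≤ c + n ∧ c + n < ((L : Nat) : Int))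
          · rw [if_pos hbnd, if_neg (by norm_num : ¬¬((0 : Int) = 0)),
              max_eq_right (by omega : c ≤ c + n), min_eq_left (by omega : c ≤ c + n),
              rowx_val m r (c + n + 1) hr0 (by omega) (by omega) (by omega),
              rowx_val m r c hr0 (by omega) hc0 (by omega)]
            have hseg := seg_E m L hrect r c n hok hr0 hrH hc0 hcell (by omega) (by omega)
            by_cases hmv : ClearUpto m (m.length : Int) (L : Int) r c 0 1 n
            · rw [if_pos (hA.mpr hmv), if_pos (hseg.mpr hmv)]
              refine ⟨rfl, r, c + n, rfl, hr0, hrH, by omega, by omega, ?_⟩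
              by_cases hn0 : n = 0
              · subst hn0; simpa using hcell
              · have hk := hmv n (by omega) (by omega)
                simp only [one_mul, zero_mul, add_zero] at hk
                exact hk.2.2.2.2
            · rw [if_neg (fun h => hmv (hA.mp h)), if_neg (fun h => hmv (hseg.mp h))]
              exact ⟨rfl, r, c, rfl, hr0, hrH, hc0, hcW, hcell⟩
          · rw [if_neg hbnd]
            have hnmv : ¬ ClearUpto m (m.length : Int) (L : Int) r c 0 1 n := by
              intro hmv
              apply hbnd
              by_cases hn0 : n = 0
              · subst hn0; exact ⟨hr0, hrH, by omega, by omega⟩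
              · obtain ⟨a1, a2, a3, a4, -⟩ := hmv n (by omega) (by omega)
                exact ⟨hr0, hrH, by omega, by omega⟩
            rw [if_neg (fun h => hnmv (hA.mp h))]
            exact ⟨rfl, r, c, rfl, hr0, hrH, hc0, hcW, hcell⟩
        · by_cases hdW : d = "W"
          · subst hdW
            rw [get_moves_W]
            simp only [neg_one_mul, one_mul, zero_mul, add_zero, ← sub_eq_add_neg,
              foldl_band_any, Bool.true_and,
              if_neg (by decide : ¬("W" : String) = "S"),
              if_neg (by decide : ¬("W" : String) = "E"), if_pos rfl]
            have hA := A_W_iff m mat hX (m.length : Int) (L : Int) r c n hr0 hrH hc0 hcW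
            by_cases hbnd : (0 ≤ r ∧ r < ((m.length : Nat) : Int) ∧ 0 ≤ c - n ∧ c - n < ((L : Nat) : Int))
            · rw [if_pos hbnd, if_neg (by norm_num : ¬¬((0 : Int) = 0)),
                max_eq_left (by omega : c - n ≤ c), min_eq_right (by omega : c - n ≤ c),
                rowx_val m r (c + 1) hr0 (by omega) (by omega) (by omega),
                rowx_val m r (c - n) hr0 (by omega) (by omega) (by omega)]
              have hseg := seg_W m L hrect r c n hok hr0 hrH hc0 hcW hcell (by omega)
              by_cases hmv : ClearUpto m (m.length : Int) (L : Int) r c 0 (-1) n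
              · rw [if_pos (hA.mpr hmv), if_pos (hseg.mpr hmv)]
                refine ⟨rfl, r, c - n, rfl, hr0, hrH, by omega, by omega, ?_⟩
                by_cases hn0 : n = 0
                · subst hn0; simpa using hcell
                · have hk := hmv n (by omega) (by omega)
                  simp only [neg_one_mul, zero_mul, add_zero, ← sub_eq_add_neg] at hk
                  exact hk.2.2.2.2
              · rw [if_neg (fun h => hmv (hA.mp h)), if_neg (fun h => hmv (hseg.mp h))]
                exact ⟨rfl, r, c, rfl, hr0, hrH, hc0, hcW, hcell⟩
            · rw [if_neg hbnd]
              have hnmv : ¬ ClearUpto m (m.length : Int) (L : Int) r c 0 (-1) n := by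
                intro hmv
                apply hbnd
                by_cases hn0 : n = 0
                · subst hn0; exact ⟨hr0, hrH, by omega, by omega⟩
                · obtain ⟨a1, a2, a3, a4, -⟩ := hmv n (by omega) (by omega)
                  exact ⟨hr0, hrH, by omega, by omega⟩
              rw [if_neg (fun h => hnmv (hA.mp h))]
              exact ⟨rfl, r, c, rfl, hr0, hrH, hc0, hcW, hcell⟩
          · by_cases hdN : d = "N"
            · subst hdN
              rw [get_moves_N]
              simp only [neg_one_mul, zero_mul, add_zero, ← sub_eq_add_neg,
                foldl_band_any, Bool.true_and,
                if_neg (by decide : ¬("N" : String) = "S"),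
                if_neg (by decide : ¬("N" : String) = "E"),
                if_neg (by decide : ¬("N" : String) = "W")]
              have hA := A_N_iff m mat hX (m.length : Int) (L : Int) r c n hr0 hrH hc0 hcW
              by_cases hbnd : (0 ≤ r - n ∧ r - n < ((m.length : Nat) : Int) ∧ 0 ≤ c ∧ c < ((L : Nat) : Int))
              · rw [if_pos hbnd, if_pos (by norm_num : ¬((-1 : Int) = 0)),
                  max_eq_left (by omega : r - n ≤ r), min_eq_right (by omega : r - n ≤ r),
                  colx_val L m hrect (r + 1) c (by omega) (by omega) hc0 (by omega),
                  colx_val L m hrect (r - n) c (by omega) (by omega) hc0 (by omega)]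
                have hseg := seg_N m L hrect r c n hok hr0 hrH hc0 hcW hcell (by omega)
                by_cases hmv : ClearUpto m (m.length : Int) (L : Int) r c (-1) 0 n
                · rw [if_pos (hA.mpr hmv), if_pos (hseg.mpr hmv)]
                  refine ⟨rfl, r - n, c, rfl, by omega, by omega, hc0, hcW, ?_⟩
                  by_cases hn0 : n = 0
                  · subst hn0; simpa using hcell
                  · have hk := hmv n (by omega) (by omega)
                    simp only [neg_one_mul, zero_mul, add_zero, ← sub_eq_add_neg] at hk
                    exact hk.2.2.2.2
                · rw [if_neg (fun h => hmv (hA.mp h)), if_neg (fun h => hmv (hseg.mp h))]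
                  exact ⟨rfl, r, c, rfl, hr0, hrH, hc0, hcW, hcell⟩
              · rw [if_neg hbnd]
                have hnmv : ¬ ClearUpto m (m.length : Int) (L : Int) r c (-1) 0 n := by
                  intro hmv
                  apply hbnd
                  by_cases hn0 : n = 0
                  · subst hn0; exact ⟨by omega, by omega, hc0, hcW⟩
                  · obtain ⟨a1, a2, a3, a4, -⟩ := hmv n (by omega) (by omega)
                    exact ⟨by omega, by omega, hc0, hcW⟩
                rw [if_neg (fun h => hnmv (hA.mp h))]
                exact ⟨rfl, r, c, rfl, hr0, hrH, hc0, hcW, hcell⟩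
            · rw [get_moves_other d hdN hdS hdW hdE]
              rw [if_neg hdS, if_neg hdE, if_neg hdW, if_neg hdN]
              exact ⟨rfl, r, c, rfl, hr0, hrH, hc0, hcW, hcell⟩

-- ---- the whole route loop ----

theorem fold_routes (m mat : List (List Char)) (L : Nat)
    (hX : ∀ a b : Nat, cellN mat a b = some 'X' ↔ cellN m a b = some 'X')
    (hrect : ∀ rwl ∈ m, rwl.length = L)
    (routes : List String) :
    ∀ (r c : Int),
      (∀ rt ∈ routes, routeOk rt = true) →
      0 ≤ r → r < (m.length : Int) → 0 ≤ c → c < (L : Int) →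
      ¬ cellN m r.toNat c.toNat = some 'X' →
      routes.foldl (aStep mat (m.length : Int) (L : Int)) [r, c]
        = routes.foldl (altStep (m.map prefixX) (colPrefixes L m) (m.length : Int) (L : Int)) [r, c] := by
  induction routes with
  | nil => intro r c _ _ _ _ _ _; rfl
  | cons rt t ih =>
    intro r c hall hr0 hrH hc0 hcW hcell
    obtain ⟨heq, r', c', hres, h1, h2, h3, h4, h5⟩ :=
      step_eq m mat L hX hrect r c rt hr0 hrH hc0 hcW hcell (hall rt (by simp))
    simp only [List.foldl_cons, heq, hres]
    exact ih r' c' (fun x hx => hall x (by simp [hx])) h1 h2 h3 h4 h5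

-- ===== VERDICT (by name: the statement is the Claim_ definition above) =====
theorem solution_spec : Claim_equal_solution := by
  unfold Claim_equal_solution Spec_solution
  intro park routes _ hpre
  obtain ⟨hne, hroutes, hrest⟩ := hpre
  unfold solution solution_alt
  simp only [scanFold_eq, spFold_eq, matFold_eq, startPositions_eq]
  cases routes with
  | nil => rfl
  | cons rt rts =>
    obtain ⟨hcount, hrect⟩ := hrest.resolve_left (by simp)
    have hflat : ((park.map (fun row => row.toList)).flatten).count 'S' = 1 := by
      rw [← hcount, ← List.flatMap_def]
    have hlen : (sIdx (park.map (fun row => row.toList))).length = 1 := by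
      rw [sIdx_length]; exact hflat
    obtain ⟨x, hx⟩ := List.length_eq_one_iff.mp hlen
    obtain ⟨i, j, hxe, hi, hj, hS⟩ := mem_sIdx _ x (by rw [hx]; simp)
    have hcell : cellN (park.map (fun row => row.toList)) i j = some 'S' := by
      unfold cellN
      rw [List.getElem?_eq_getElem hi, Option.bind_some, List.getElem?_eq_getElem hj, hS]
    rw [hx, hxe]
    have hXmat := fold_modify_X [((i : Int), (j : Int))]
      (park.map (fun row => row.toList)) (park.map (fun row => row.toList))
      (fun _ _ => Iff.rfl)
      (by
        intro rc hrc
        simp only [List.mem_singleton] at hrc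
        subst hrc
        exact ⟨by simp, by simp, by simpa using hcell⟩)
    have hiH : (i : Int) < ((park.map (fun row => row.toList)).length : Int) := by
      have : i < park.length := by simpa using hi
      simp only [List.length_map]
      exact_mod_cast this
    have hjW : (j : Int) < (((park.headD "").toList.length : Nat) : Int) := by
      have hmem : park[i]'(by simpa using hi) ∈ park := List.getElem_mem _
      have hlenrow : (park[i]'(by simpa using hi)).toList.length = (park.headD "").toList.length :=
        hrect _ hmem
      have : j < (park.headD "").toList.length := by
        have hj2 := hj
        simp only [List.getElem_map] at hj2
        omega
      exact_mod_cast this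
    have hrect' : ∀ rwl ∈ (park.map (fun row => row.toList)), rwl.length = (park.headD "").toList.length := by
      intro rwl hm
      rw [List.mem_map] at hm
      obtain ⟨row, hrow, rfl⟩ := hm
      exact hrect row hrow
    have hcellX : ¬ cellN (park.map (fun row => row.toList)) ((i : Int)).toNat ((j : Int)).toNat = some 'X' := by
      rw [show ((i : Int)).toNat = i by omega, show ((j : Int)).toNat = j by omega, hcell]
      simp
    have hmain := fold_routes (park.map (fun row => row.toList)) _ (park.headD "").toList.length
      hXmat hrect' (rt :: rts) (i : Int) (j : Int) hroutes
      (by positivity) (by simpa using hiH) (by positivity) hjW hcellX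
    simp only [List.length_map] at hmain
    rw [show park.map (fun row => prefixX row.toList)
          = (park.map (fun row => row.toList)).map prefixX by rw [List.map_map]; rfl]
    exact hmain
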